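-- pv_equiv track=rewrite | github.com/yvi7693/algorithms | HW3/main.py | reverse_even_numbers
-- ===== SOURCE A (Python) =====
-- def reverse_even_numbers(collection: list[int]) -> list[int]:
--     indexes = []
--
--     for i in range(len(collection)):
--         if collection[i] % 2 == 0:
--             indexes.append(i)
--
--     for i in range(len(indexes) // 2):
--         collection[indexes[i]], collection[indexes[len(indexes) - 1 - i]] = collection[indexes[len(indexes) - 1 - i]], collection[indexes[i]]
--
--     return collection
-- ===== SOURCE B (Python) =====
-- def reverse_even_numbers(collection: list[int]) -> list[int]:
--     values = iter([x for x in collection if x % 2 == 0][::-1])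
--     for i in range(len(collection)):
--         if collection[i] % 2 == 0:
--             collection[i] = next(values)
--     return collection
-- ===== Notes on version B (the rewrite author's own statement) =====
-- stated objective: simpler
-- what changed: B replaces A's index list + symmetric two-pointer swap loop by collecting the even values, reversing that value list once, and sequentially refilling the even slots in a single forward pass.
import Mathlib
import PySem

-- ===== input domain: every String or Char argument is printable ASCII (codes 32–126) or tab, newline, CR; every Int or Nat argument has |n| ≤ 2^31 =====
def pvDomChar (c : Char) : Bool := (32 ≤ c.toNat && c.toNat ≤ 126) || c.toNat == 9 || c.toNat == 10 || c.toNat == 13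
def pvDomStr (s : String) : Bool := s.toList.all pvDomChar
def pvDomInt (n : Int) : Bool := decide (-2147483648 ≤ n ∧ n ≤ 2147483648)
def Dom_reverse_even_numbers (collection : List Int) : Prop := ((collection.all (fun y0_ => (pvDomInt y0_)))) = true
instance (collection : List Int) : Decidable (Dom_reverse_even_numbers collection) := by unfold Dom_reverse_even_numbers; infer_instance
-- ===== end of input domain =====

-- B collects the even values, reverses that value list once, and refills the even
-- slots in one forward pass, instead of A's index list + symmetric swap loop
-- (equal return value; like A, the Python B mutates its argument in place).


-- ===== PORT A =====
-- c[a], c[b] = c[b], c[a]  (RHS read first, then both assignments); indices always in range here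
def pvSwapA (c : List Int) (idx : List Nat) (i j : Nat) : List Int :=
  let a := idx.getD i 0
  let b := idx.getD j 0
  (c.set a (c.getD b 0)).set b (c.getD a 0)

def reverse_even_numbers (collection : List Int) : List Int :=
  let indexes : List Nat :=
    (List.range collection.length).foldl
      (fun acc i => if collection.getD i 0 % 2 == 0 then acc ++ [i] else acc) []
  (List.range (indexes.length / 2)).foldl
    (fun c i => pvSwapA c indexes i (indexes.length - 1 - i)) collection

-- ===== PORT B =====
-- the 'for i in range(len(collection))' fill loop: rebuilds the list, replacing each
-- even element by the next value drawn from vs (next(values)); vs never runs out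
def pvFill (xs : List Int) (vs : List Int) : List Int :=
  match xs, vs with
  | [], _ => []
  | x :: xs, vs =>
    if x % 2 == 0 then
      match vs with
      | v :: vs' => v :: pvFill xs vs'
      | [] => x :: pvFill xs []
    else x :: pvFill xs vs

def reverse_even_numbers_alt (collection : List Int) : List Int :=
  pvFill collection ((collection.filter (fun x => x % 2 == 0)).reverse)

-- ===== PRECONDITION & SPEC =====
def Spec_reverse_even_numbers (collection : List Int) (out : List Int) : Prop := out = reverse_even_numbers_alt collection
instance (collection : List Int) (out : List Int) : Decidable (Spec_reverse_even_numbers collection out) := by unfold Spec_reverse_even_numbers; infer_instance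

-- ===== CLAIM (what is proved, stated in full; the proofs are below) =====
def Claim_equal_reverse_even_numbers : Prop := ∀ (collection : List Int), Dom_reverse_even_numbers collection → Spec_reverse_even_numbers collection (reverse_even_numbers collection)

-- ===== LEMMAS AND PROOFS =====

-- recursive version of A's index list (positions of even elements)
def pvPos : List Int → List Nat
  | [] => []
  | x :: xs => if x % 2 == 0 then 0 :: (pvPos xs).map (· + 1) else (pvPos xs).map (· + 1)

-- write values vs at positions p (in order)
def pvPlace (xs : List Int) (p : List Nat) (vs : List Int) : List Int :=
  (p.zip vs).foldl (fun c iv => c.set iv.1 iv.2) xs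

-- two-ended recursive version of A's swap loop
def pvSweep (idx : List Nat) (c : List Int) (i j : Nat) : List Int :=
  if h : i < j then pvSweep idx (pvSwapA c idx i j) (i + 1) (j - 1) else c
termination_by j - i
decreasing_by omega

theorem pvFoldl_append_if (P : Nat → Bool) :
    ∀ (l : List Nat) (acc : List Nat),
      l.foldl (fun a i => if P i then a ++ [i] else a) acc = acc ++ l.filter P := by
  intro l
  induction l with
  | nil => simp
  | cons x l ih =>
    intro acc
    by_cases h : P x <;> simp [List.foldl_cons, h, ih]

theorem pvIdx_eq (xs : List Int) :
    (List.range xs.length).foldl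
      (fun acc i => if xs.getD i 0 % 2 == 0 then acc ++ [i] else acc) [] = pvPos xs := by
  rw [pvFoldl_append_if]
  simp only [List.nil_append]
  induction xs with
  | nil => simp [pvPos]
  | cons x xs ih =>
    simp only [List.length_cons, List.range_succ_eq_map, List.filter_cons, pvPos]
    have h0 : ((x :: xs).getD 0 0 % 2 == 0) = (x % 2 == 0) := by simp
    have step : List.filter (fun i => (x :: xs).getD i 0 % 2 == 0)
        (List.map Nat.succ (List.range xs.length)) = List.map (fun i => i + 1) (pvPos xs) := by
      rw [List.filter_map]
      simp only [Function.comp_def, List.getD_cons_succ, ih, Nat.succ_eq_add_one]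
    rw [h0]
    by_cases h : x % 2 == 0
    · rw [if_pos h, if_pos h, step]
    · rw [if_neg h, if_neg h, step]

theorem pvPos_lt (xs : List Int) : ∀ i ∈ pvPos xs, i < xs.length := by
  induction xs with
  | nil => simp [pvPos]
  | cons x xs ih =>
    intro i hi
    simp only [pvPos] at hi
    by_cases h : x % 2 == 0
    · rw [if_pos h] at hi
      rcases List.mem_cons.mp hi with rfl | hi
      · simp
      · rcases List.mem_map.mp hi with ⟨j, hj, rfl⟩
        have := ih j hj; simp; omega
    · rw [if_neg h] at hi
      rcases List.mem_map.mp hi with ⟨j, hj, rfl⟩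
      have := ih j hj; simp; omega

theorem pvPos_nodup (xs : List Int) : (pvPos xs).Nodup := by
  induction xs with
  | nil => simp [pvPos]
  | cons x xs ih =>
    simp only [pvPos]
    have hmap : ((pvPos xs).map (· + 1)).Nodup :=
      ih.map (fun a b hab => by omega)
    by_cases h : x % 2 == 0
    · rw [if_pos h]
      exact List.nodup_cons.mpr ⟨by simp, hmap⟩
    · rw [if_neg h]; exact hmap

theorem pvPos_map_getD (xs : List Int) :
    (pvPos xs).map (fun i => xs.getD i 0) = xs.filter (fun x => x % 2 == 0) := by
  induction xs with
  | nil => simp [pvPos]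
  | cons x xs ih =>
    simp only [pvPos, List.filter_cons]
    by_cases h : x % 2 == 0 <;>
      simp [h, List.map_map, Function.comp_def, List.getD_cons_succ, List.getD_cons_zero,
        ← List.getD_eq_getElem?_getD, ih]

theorem pvPos_length (xs : List Int) :
    (pvPos xs).length = (xs.filter (fun x => x % 2 == 0)).length := by
  have := congrArg List.length (pvPos_map_getD xs)
  simpa using this

-- shift lemma: placing at positions +1 on a cons
theorem pvFoldl_set_shift (P : List (Nat × Int)) :
    ∀ (a : Int) (l : List Int),
      P.foldl (fun c iv => c.set (iv.1 + 1) iv.2) (a :: l)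
        = a :: P.foldl (fun c iv => c.set iv.1 iv.2) l := by
  induction P with
  | nil => intro a l; simp
  | cons p P ih => intro a l; simp [List.foldl_cons, List.set_cons_succ, ih]

theorem pvZip_map_left (p : List Nat) :
    ∀ vs : List Int, (p.map (· + 1)).zip vs = (p.zip vs).map (fun iv => (iv.1 + 1, iv.2)) := by
  induction p with
  | nil => intro vs; simp
  | cons a p ih => intro vs; cases vs <;> simp [ih]

theorem pvPlace_cons_shift (x : Int) (xs : List Int) (p : List Nat) (vs : List Int) :
    pvPlace (x :: xs) (p.map (· + 1)) vs = x :: pvPlace xs p vs := by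
  unfold pvPlace
  rw [pvZip_map_left, List.foldl_map]
  exact pvFoldl_set_shift _ x xs

theorem pvFill_eq_place (xs : List Int) :
    ∀ vs, vs.length = (xs.filter (fun x => x % 2 == 0)).length →
      pvFill xs vs = pvPlace xs (pvPos xs) vs := by
  induction xs with
  | nil => intro vs _; simp [pvFill, pvPlace, pvPos]
  | cons x xs ih =>
    intro vs hlen
    by_cases h : x % 2 == 0
    · rw [List.filter_cons, if_pos h] at hlen
      match vs, hlen with
      | v :: vs', hlen =>
        have hlen' : vs'.length = (xs.filter (fun x => x % 2 == 0)).length := by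
          simpa using hlen
        simp only [pvFill, pvPos, if_pos h]
        rw [ih vs' hlen']
        have hrfl : pvPlace (x :: xs) (0 :: (pvPos xs).map (· + 1)) (v :: vs')
            = pvPlace ((x :: xs).set 0 v) ((pvPos xs).map (· + 1)) vs' := by
          simp [pvPlace, List.zip_cons_cons, List.foldl_cons]
        rw [hrfl, List.set_cons_zero, pvPlace_cons_shift]
    · rw [List.filter_cons, if_neg h] at hlen
      simp only [pvFill, pvPos, if_neg h]
      rw [ih vs hlen, ← pvPlace_cons_shift x xs (pvPos xs) vs]

-- pvPlace pointwise
theorem pvPlace_length (p : List Nat) : ∀ (xs vs : List Int),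
    (pvPlace xs p vs).length = xs.length := by
  induction p with
  | nil => intro xs vs; simp [pvPlace]
  | cons a p ih =>
    intro xs vs
    match vs with
    | [] => simp [pvPlace]
    | v :: vs => simp only [pvPlace, List.zip_cons_cons, List.foldl_cons]
                 simpa [pvPlace] using ih (xs.set a v) vs

theorem pvPlace_getD_not_mem (p : List Nat) : ∀ (xs vs : List Int) (q : Nat),
    q ∉ p → (pvPlace xs p vs).getD q 0 = xs.getD q 0 := by
  induction p with
  | nil => intro xs vs q _; simp [pvPlace]
  | cons a p ih =>
    intro xs vs q hq
    match vs with
    | [] => simp [pvPlace]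
    | v :: vs =>
      simp only [pvPlace, List.zip_cons_cons, List.foldl_cons]
      have h1 : q ≠ a := fun h => hq (h ▸ List.mem_cons_self)
      have h2 : q ∉ p := fun h => hq (List.mem_cons_of_mem _ h)
      have := ih (xs.set a v) vs q h2
      simp only [pvPlace] at this
      rw [this, List.getD_eq_getElem?_getD, List.getD_eq_getElem?_getD,
        List.getElem?_set_ne (fun h => h1 h.symm)]

theorem pvPlace_getD_at (p : List Nat) : ∀ (xs vs : List Int) (k : Nat),
    p.Nodup → k < p.length → k < vs.length → (∀ i ∈ p, i < xs.length) →
    (pvPlace xs p vs).getD (p.getD k 0) 0 = vs.getD k 0 := by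
  induction p with
  | nil => intro xs vs k _ hk; simp at hk
  | cons a p ih =>
    intro xs vs k hnd hk hv hlt
    match vs, hv with
    | v :: vs, hv =>
      simp only [pvPlace, List.zip_cons_cons, List.foldl_cons]
      match k with
      | 0 =>
        simp only [List.getD_cons_zero]
        have hna : a ∉ p := (List.nodup_cons.mp hnd).1
        have := pvPlace_getD_not_mem p (xs.set a v) vs a hna
        simp only [pvPlace] at this
        rw [this, List.getD_eq_getElem?_getD, List.getElem?_set_self
          (by exact hlt a List.mem_cons_self)]
        rfl
      | k + 1 =>
        simp only [List.getD_cons_succ]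
        exact ih (xs.set a v) vs k (List.nodup_cons.mp hnd).2 (by simpa using hk)
          (by simpa using hv) (fun i hi => by simpa using hlt i (List.mem_cons_of_mem _ hi))

-- getD/set/nodup utilities
theorem pvGetD_set_ne (c : List Int) (a q : Nat) (v : Int) (h : q ≠ a) :
    (c.set a v).getD q 0 = c.getD q 0 := by
  rw [List.getD_eq_getElem?_getD, List.getD_eq_getElem?_getD,
    List.getElem?_set_ne (fun hh => h hh.symm)]

theorem pvGetD_set_eq (c : List Int) (a : Nat) (v : Int) (h : a < c.length) :
    (c.set a v).getD a 0 = v := by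
  rw [List.getD_eq_getElem?_getD, List.getElem?_set_self h]; rfl

theorem pvGetD_mem (idx : List Nat) (k : Nat) (h : k < idx.length) :
    idx.getD k 0 ∈ idx := by
  simpa [List.getD_eq_getElem?_getD, List.getElem?_eq_getElem h] using List.getElem_mem h

theorem pvNodup_getD_ne (idx : List Nat) (hnd : idx.Nodup) (a b : Nat)
    (ha : a < idx.length) (hb : b < idx.length) (hab : a ≠ b) :
    idx.getD a 0 ≠ idx.getD b 0 := by
  simp only [List.getD_eq_getElem?_getD, List.getElem?_eq_getElem ha,
    List.getElem?_eq_getElem hb, Option.getD_some]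
  intro h
  exact hab ((List.Nodup.getElem_inj_iff hnd).mp h)

-- A's range fold equals pvSweep
theorem pvFold_eq_sweep (idx : List Nat) (m : Nat) (hm : m = idx.length) :
    ∀ (n t : Nat) (c : List Int), n = m / 2 - t → t ≤ m / 2 →
      (List.range' t n).foldl (fun c i => pvSwapA c idx i (m - 1 - i)) c
        = pvSweep idx c t (m - 1 - t) := by
  intro n
  induction n with
  | zero =>
    intro t c hn ht
    rw [pvSweep, dif_neg (by omega)]
    simp
  | succ n ih =>
    intro t c hn ht
    rw [List.range'_succ, List.foldl_cons, pvSweep, dif_pos (by omega : t < m - 1 - t)]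
    have : m - 1 - t - 1 = m - 1 - (t + 1) := by omega
    rw [← this] at *
    exact ih (t + 1) _ (by omega) (by omega)

-- pvSweep preserves length
theorem pvSweep_length (idx : List Nat) : ∀ (fuel : Nat) (c : List Int) (i j : Nat),
    j - i ≤ fuel → (pvSweep idx c i j).length = c.length := by
  intro fuel
  induction fuel with
  | zero =>
    intro c i j hf
    rw [pvSweep, dif_neg (by omega)]
  | succ fuel ih =>
    intro c i j hf
    by_cases hij : i < j
    · rw [pvSweep, dif_pos hij, ih _ (i + 1) (j - 1) (by omega)]
      simp [pvSwapA]
    · rw [pvSweep, dif_neg hij]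

-- pvSweep leaves untouched positions alone
theorem pvSweep_getD_not_mem (idx : List Nat) : ∀ (fuel : Nat) (c : List Int) (i j q : Nat),
    j - i ≤ fuel → (i < j → j < idx.length) →
    (∀ k, i ≤ k → k ≤ j → k < idx.length → q ≠ idx.getD k 0) →
    (pvSweep idx c i j).getD q 0 = c.getD q 0 := by
  intro fuel
  induction fuel with
  | zero =>
    intro c i j q hf _ _
    rw [pvSweep, dif_neg (by omega)]
  | succ fuel ih =>
    intro c i j q hf hjl h
    by_cases hij : i < j
    · rw [pvSweep, dif_pos hij]
      have hj : j < idx.length := hjl hij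
      rw [ih _ (i + 1) (j - 1) q (by omega) (fun h' => by omega)
          (fun k hk1 hk2 hk3 => h k (by omega) (by omega) hk3)]
      simp only [pvSwapA]
      rw [pvGetD_set_ne _ _ _ _ (h j (by omega) le_rfl hj),
        pvGetD_set_ne _ _ _ _ (h i le_rfl (by omega) (by omega))]
    · rw [pvSweep, dif_neg hij]

-- pvSweep reverses the values found at the positions idx[i..j]
theorem pvSweep_getD_at (idx : List Nat) (hnd : idx.Nodup) :
    ∀ (fuel : Nat) (c : List Int) (i j k : Nat),
    j - i ≤ fuel → (∀ x ∈ idx, x < c.length) → j < idx.length →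
    i ≤ k → k ≤ j →
    (pvSweep idx c i j).getD (idx.getD k 0) 0 = c.getD (idx.getD (i + j - k) 0) 0 := by
  intro fuel
  induction fuel with
  | zero =>
    intro c i j k hf hlt hj hik hkj
    rw [pvSweep, dif_neg (by omega)]
    have : i + j - k = k := by omega
    rw [this]
  | succ fuel ih =>
    intro c i j k hf hlt hj hik hkj
    by_cases hij : i < j
    · rw [pvSweep, dif_pos hij]
      set a := idx.getD i 0 with ha
      set b := idx.getD j 0 with hb
      have hia : i < idx.length := by omega
      have hab : a ≠ b := pvNodup_getD_ne idx hnd i j hia hj (by omega)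
      have hac : a < c.length := hlt a (pvGetD_mem idx i hia)
      have hbc : b < c.length := hlt b (pvGetD_mem idx j hj)
      have hlt' : ∀ x ∈ idx, x < (pvSwapA c idx i j).length := by
        intro x hx; simpa [pvSwapA, ← ha, ← hb] using hlt x hx
      rcases Nat.lt_trichotomy k i with hki | rfl | hki
      · omega
      · -- k = i : the recursive sweep does not touch idx[i]
        rw [pvSweep_getD_not_mem idx fuel _ (k + 1) (j - 1) a (by omega)
            (fun h' => by omega)
            (fun k' h1 h2 h3 => pvNodup_getD_ne idx hnd k k' hia h3 (by omega))]
        simp only [pvSwapA, ← ha, ← hb]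
        rw [pvGetD_set_ne _ _ _ _ hab, pvGetD_set_eq _ _ _ hac]
        have : k + j - k = j := by omega
        rw [this]
      · rcases Nat.lt_or_ge k j with hkj' | hkj'
        · -- i < k < j : interior, handled by the recursive call
          have hik' : i + 1 ≤ k := hki
          have hr := ih (pvSwapA c idx i j) (i + 1) (j - 1) k (by omega) hlt'
            (by omega) hik' (by omega)
          rw [hr]
          have he : i + 1 + (j - 1) - k = i + j - k := by omega
          rw [he]
          have h1 : i + j - k < idx.length := by omega
          have hne1 : idx.getD (i + j - k) 0 ≠ a :=
            pvNodup_getD_ne idx hnd (i + j - k) i h1 hia (by omega)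
          have hne2 : idx.getD (i + j - k) 0 ≠ b :=
            pvNodup_getD_ne idx hnd (i + j - k) j h1 hj (by omega)
          simp only [pvSwapA, ← ha, ← hb]
          rw [pvGetD_set_ne _ _ _ _ hne2, pvGetD_set_ne _ _ _ _ hne1]
        · -- k = j : the recursive sweep does not touch idx[j]
          have hkj'' : k = j := by omega
          subst hkj''
          rw [pvSweep_getD_not_mem idx fuel _ (i + 1) (k - 1) b (by omega)
              (fun h' => by omega)
              (fun k' h1 h2 h3 => pvNodup_getD_ne idx hnd k k' hj h3 (by omega))]
          simp only [pvSwapA, ← ha, ← hb]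
          rw [pvGetD_set_eq]
          · have : i + k - k = i := by omega
            rw [this]
          · simpa using hbc
    · rw [pvSweep, dif_neg hij]
      have : i + j - k = k := by omega
      rw [this]

-- reading xs at the k-th even position yields the k-th even value
theorem pvVal (xs : List Int) (k : Nat) (hk : k < (pvPos xs).length) :
    xs.getD ((pvPos xs).getD k 0) 0 = (xs.filter (fun x => x % 2 == 0)).getD k 0 := by
  have h := pvPos_map_getD xs
  have hk2 : k < (xs.filter (fun x => x % 2 == 0)).length := by
    rw [← pvPos_length]; exact hk
  simp only [List.getD_eq_getElem?_getD, ← h, List.getElem?_map,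
    List.getElem?_eq_getElem hk, Option.map_some, Option.getD_some]

-- ===== VERDICT (by name: the statement is the Claim_ definition above) =====
theorem reverse_even_numbers_spec : Claim_equal_reverse_even_numbers := by
  unfold Claim_equal_reverse_even_numbers
  intro xs _
  unfold Spec_reverse_even_numbers
  have hA : reverse_even_numbers xs = pvSweep (pvPos xs) xs 0 ((pvPos xs).length - 1) := by
    simp only [reverse_even_numbers]
    rw [pvIdx_eq, List.range_eq_range']
    simpa using pvFold_eq_sweep (pvPos xs) (pvPos xs).length rfl ((pvPos xs).length / 2) 0 xs
      (by omega) (by omega)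
  have hB : reverse_even_numbers_alt xs
      = pvPlace xs (pvPos xs) ((xs.filter (fun x => x % 2 == 0)).reverse) := by
    unfold reverse_even_numbers_alt
    exact pvFill_eq_place xs _ (by simp [pvPos_length])
  rw [hA, hB]
  have hml : (pvPos xs).length = (xs.filter (fun x => x % 2 == 0)).length := pvPos_length xs
  have hnd : (pvPos xs).Nodup := pvPos_nodup xs
  have hlt : ∀ i ∈ pvPos xs, i < xs.length := pvPos_lt xs
  have hlen1 : (pvSweep (pvPos xs) xs 0 ((pvPos xs).length - 1)).length = xs.length :=
    pvSweep_length (pvPos xs) ((pvPos xs).length - 1) xs 0 ((pvPos xs).length - 1) le_rfl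
  have hlen2 : (pvPlace xs (pvPos xs) ((xs.filter (fun x => x % 2 == 0)).reverse)).length
      = xs.length := pvPlace_length (pvPos xs) xs _
  apply List.ext_getElem (by rw [hlen1, hlen2])
  intro n h1 h2
  rw [← List.getD_eq_getElem _ 0 h1, ← List.getD_eq_getElem _ 0 h2]
  by_cases hmem : n ∈ pvPos xs
  · obtain ⟨k, hk, hkn⟩ := List.getElem_of_mem hmem
    have hm1 : 1 ≤ (pvPos xs).length := by omega
    have hkd : (pvPos xs).getD k 0 = n := by rw [List.getD_eq_getElem _ 0 hk]; exact hkn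
    rw [← hkd]
    rw [pvSweep_getD_at (pvPos xs) hnd ((pvPos xs).length - 1) xs 0 ((pvPos xs).length - 1) k
      (by omega) hlt (by omega) (by omega) (by omega)]
    rw [pvPlace_getD_at (pvPos xs) xs _ k hnd hk (by simp; omega) hlt]
    have hz : 0 + ((pvPos xs).length - 1) - k = (pvPos xs).length - 1 - k := by omega
    rw [hz, pvVal xs _ (by omega)]
    have hrk : k < ((xs.filter (fun x => x % 2 == 0)).reverse).length := by simp; omega
    rw [List.getD_eq_getElem _ 0 hrk,
      List.getD_eq_getElem _ 0 (by omega : (pvPos xs).length - 1 - k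
        < (xs.filter (fun x => x % 2 == 0)).length),
      List.getElem_reverse]
    congr 1
    omega
  · rw [pvSweep_getD_not_mem (pvPos xs) ((pvPos xs).length - 1) xs 0
      ((pvPos xs).length - 1) n le_rfl (by omega)
      (fun k _ _ hk3 => fun he => hmem (he ▸ pvGetD_mem (pvPos xs) k hk3))]
    rw [pvPlace_getD_not_mem (pvPos xs) xs _ n hmem]
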